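-- pv_equiv track=rewrite | github.com/Ookamiko/AdventOfCode | year_2015/day/day08.py | level2
-- ===== SOURCE A (Python) =====
-- def level2(input):
-- 	str_list = input.strip().split("\n")
-- 	count_new = 0
-- 	count_old = 0
--
-- 	for current in str_list:
-- 		count_old += len(current)
-- 		count_new += len(current.replace('\\', '\\\\').replace('"', '\\"')) + 2
--
-- 	return str(count_new - count_old)
-- ===== SOURCE B (Python) =====
-- def level2(input):
-- 	total = 0
-- 	for current in input.strip().split("\n"):
-- 		total += 2 + current.count('\\') + current.count('"')
-- 	return str(total)
-- ===== Notes on version B (the rewrite author's own statement) =====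
-- stated objective: simpler
-- what changed: B never builds the escaped strings: per line it adds 2 plus the number of backslash and quote characters directly, instead of constructing two replaced strings and subtracting lengths.
import Mathlib
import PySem

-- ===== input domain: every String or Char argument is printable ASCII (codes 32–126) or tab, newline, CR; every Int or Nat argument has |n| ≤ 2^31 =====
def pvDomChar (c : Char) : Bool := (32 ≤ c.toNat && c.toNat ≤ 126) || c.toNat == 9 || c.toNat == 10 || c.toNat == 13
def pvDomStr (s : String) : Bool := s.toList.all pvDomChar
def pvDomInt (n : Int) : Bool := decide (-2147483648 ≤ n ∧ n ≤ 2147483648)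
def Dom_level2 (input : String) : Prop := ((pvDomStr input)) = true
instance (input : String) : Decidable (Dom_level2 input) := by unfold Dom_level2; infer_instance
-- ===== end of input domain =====

-- ===== PORT A =====
-- builds the escaped string per line (replace '\' -> '\\', then '"' -> '\"') and sums both lengths
def level2 (input : String) : String :=
  let strList := (PySem.Str.split? (PySem.Str.strip input) "\n").getD []
  let p : Int × Int := strList.foldl
    (fun (p : Int × Int) current =>
      (p.1 + PySem.Str.len current,
       p.2 + PySem.Str.len (PySem.Str.replace (PySem.Str.replace current "\\" "\\\\") "\"" "\\\"") + 2))
    (0, 0)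
  PySem.Int.toStr (p.2 - p.1)

-- ===== PORT B =====
-- counts growth directly: 2 quotes plus one extra char per backslash and per quote
def level2_alt (input : String) : String :=
  let total : Int := ((PySem.Str.split? (PySem.Str.strip input) "\n").getD []).foldl
    (fun (t : Int) current =>
      t + 2 + (PySem.Str.count current "\\" : Int) + (PySem.Str.count current "\"" : Int))
    0
  PySem.Int.toStr total

-- ===== PRECONDITION & SPEC =====
def Spec_level2 (input : String) (out : String) : Prop := out = level2_alt input
instance (input : String) (out : String) : Decidable (Spec_level2 input out) := by unfold Spec_level2; infer_instance

-- ===== CLAIM (what is proved, stated in full; the proofs are below) =====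
def Claim_equal_level2 : Prop := ∀ (input : String), Dom_level2 input → Spec_level2 input (level2 input)

-- ===== LEMMAS AND PROOFS =====

-- single-char replace is a flatMap substitution
theorem replace_go_single (c : Char) (w : List Char) :
    ∀ (l : List Char) (fuel : Nat) (acc : List Char), l.length ≤ fuel →
      PySem.Chars.replace.go [c] w fuel l acc
        = acc.reverse ++ l.flatMap (fun x => if x = c then w else [x]) := by
  intro l
  induction l with
  | nil =>
    intro fuel acc _
    cases fuel <;> simp [PySem.Chars.replace.go]
  | cons x t ih =>
    intro fuel acc h
    cases fuel with
    | zero => simp at h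
    | succ n =>
      by_cases hx : x = c
      · subst hx
        have hpre : [x].isPrefixOf (x :: t) = true := by simp [List.isPrefixOf]
        simp only [PySem.Chars.replace.go, hpre, if_true]
        rw [show List.drop [x].length (x :: t) = t from by simp,
          ih n (w.reverse ++ acc) (by simpa using h)]
        simp
      · have hpre : [c].isPrefixOf (x :: t) = false := by
          simp [List.isPrefixOf]
          exact fun hc => (hx hc.symm).elim
        simp only [PySem.Chars.replace.go, hpre]
        rw [ih n (x :: acc) (by simpa using h)]
        simp [hx]

theorem replace_single (c : Char) (w : List Char) (l : List Char) :
    PySem.Chars.replace l [c] w = l.flatMap (fun x => if x = c then w else [x]) := by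
  simp [PySem.Chars.replace, replace_go_single c w l l.length [] (le_refl _)]

-- single-char count is List.count
theorem count_go_single (c : Char) :
    ∀ (l : List Char) (fuel : Nat) (acc : Nat), l.length ≤ fuel →
      PySem.Chars.count.go [c] fuel l acc = acc + l.count c := by
  intro l
  induction l with
  | nil =>
    intro fuel acc _
    cases fuel <;> simp [PySem.Chars.count.go]
  | cons x t ih =>
    intro fuel acc h
    cases fuel with
    | zero => simp at h
    | succ n =>
      by_cases hx : x = c
      · subst hx
        have hpre : [x].isPrefixOf (x :: t) = true := by simp [List.isPrefixOf]
        simp only [PySem.Chars.count.go, hpre, if_true]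
        rw [show List.drop [x].length (x :: t) = t from by simp,
          ih n (acc + 1) (by simpa using h)]
        simp
        omega
      · have hpre : [c].isPrefixOf (x :: t) = false := by
          simp [List.isPrefixOf]
          exact fun hc => (hx hc.symm).elim
        simp only [PySem.Chars.count.go, hpre]
        rw [ih n acc (by simpa using h)]
        simp [hx]

theorem count_single (c : Char) (l : List Char) :
    PySem.Chars.count l [c] = l.count c := by
  simp [PySem.Chars.count, count_go_single c l l.length 0 (le_refl _)]

-- per-line: length of the doubly escaped string = original length + #backslashes + #quotes
theorem escaped_len (cs : List Char) :
    (PySem.Chars.replace (PySem.Chars.replace cs ['\\'] ['\\', '\\']) ['\"'] ['\\', '\"']).length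
      = cs.length + cs.count '\\' + cs.count '\"' := by
  rw [replace_single, replace_single]
  induction cs with
  | nil => simp
  | cons x t ih =>
    by_cases h1 : x = '\\'
    · subst h1
      simp [ih]
      omega
    · by_cases h2 : x = '\"'
      · subst h2
        simp [ih]
        omega
      · simp [h1, h2, ih]
        omega

-- the two folds agree up to the difference of A's pair
theorem fold_rel (ls : List String) :
    ∀ (co cn : Int),
      (ls.foldl
        (fun (p : Int × Int) current =>
          (p.1 + PySem.Str.len current,
           p.2 + PySem.Str.len (PySem.Str.replace (PySem.Str.replace current "\\" "\\\\") "\"" "\\\"") + 2))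
        (co, cn)).2
      - (ls.foldl
        (fun (p : Int × Int) current =>
          (p.1 + PySem.Str.len current,
           p.2 + PySem.Str.len (PySem.Str.replace (PySem.Str.replace current "\\" "\\\\") "\"" "\\\"") + 2))
        (co, cn)).1
      = ls.foldl
          (fun (t : Int) current =>
            t + 2 + (PySem.Str.count current "\\" : Int) + (PySem.Str.count current "\"" : Int))
          (cn - co) := by
  induction ls with
  | nil => intro co cn; simp
  | cons s ls ih =>
    intro co cn
    simp only [List.foldl_cons]
    rw [ih]
    congr 1
    have hrep : (PySem.Str.replace (PySem.Str.replace s "\\" "\\\\") "\"" "\\\"").toList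
        = PySem.Chars.replace (PySem.Chars.replace s.toList ['\\'] ['\\', '\\']) ['\"'] ['\\', '\"'] := by
      rw [PySem.Str.toList_replace, PySem.Str.toList_replace]
      rfl
    have hlen : PySem.Str.len (PySem.Str.replace (PySem.Str.replace s "\\" "\\\\") "\"" "\\\"")
        = ((PySem.Chars.replace (PySem.Chars.replace s.toList ['\\'] ['\\', '\\']) ['\"'] ['\\', '\"']).length : Int) := by
      rw [PySem.Str.len_eq, hrep]
    have hc1 : PySem.Str.count s "\\" = s.toList.count '\\' := by
      rw [PySem.Str.count_eq]
      exact count_single '\\' s.toList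
    have hc2 : PySem.Str.count s "\"" = s.toList.count '\"' := by
      rw [PySem.Str.count_eq]
      exact count_single '\"' s.toList
    rw [hlen, hc1, hc2, PySem.Str.len_eq, escaped_len]
    push_cast
    ring

-- ===== VERDICT (by name: the statement is the Claim_ definition above) =====
theorem level2_spec : Claim_equal_level2 := by
  intro input _
  unfold Spec_level2 level2 level2_alt
  have h := fold_rel ((PySem.Str.split? (PySem.Str.strip input) "\n").getD []) 0 0
  simp only [sub_zero] at h
  simp only [h]
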